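-- pv_equiv track=rewrite | github.com/benoitdebecker1995-png/history-vs-hype | tools/script_checkers/checkers/repetition.py | _overall_severity
-- ===== SOURCE A (Python) =====
-- from typing import List, Dict, Any, Tuple
--
-- def _overall_severity(issues: List[Dict[str, Any]]) -> str:
--     """Determine overall severity from all issues"""
--     if not issues:
--         return 'ok'
--
--     severities = [i['severity'] for i in issues]
--     if 'error' in severities:
--         return 'error'
--     elif 'warning' in severities:
--         return 'warning'
--     elif 'info' in severities:
--         return 'info'
--     else:
--         return 'ok'
-- ===== SOURCE B (Python) =====
-- def _overall_severity(issues):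
--     """Determine overall severity from all issues"""
--     rank = 0
--     for i in issues:
--         s = i['severity']
--         r = 3 if s == 'error' else 2 if s == 'warning' else 1 if s == 'info' else 0
--         if r > rank:
--             rank = r
--         if rank == 3:
--             break
--     if rank == 3:
--         return 'error'
--     if rank == 2:
--         return 'warning'
--     if rank == 1:
--         return 'info'
--     return 'ok'
-- ===== Notes on version B (the rewrite author's own statement) =====
-- stated objective: alternative
-- what changed: Replaces the materialised severities list plus three sequential membership scans with a single pass that tracks the maximum severity rank (error=3, warning=2, info=1, other=0), breaking early on 'error', and maps the final rank back to its label.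
import Mathlib
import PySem

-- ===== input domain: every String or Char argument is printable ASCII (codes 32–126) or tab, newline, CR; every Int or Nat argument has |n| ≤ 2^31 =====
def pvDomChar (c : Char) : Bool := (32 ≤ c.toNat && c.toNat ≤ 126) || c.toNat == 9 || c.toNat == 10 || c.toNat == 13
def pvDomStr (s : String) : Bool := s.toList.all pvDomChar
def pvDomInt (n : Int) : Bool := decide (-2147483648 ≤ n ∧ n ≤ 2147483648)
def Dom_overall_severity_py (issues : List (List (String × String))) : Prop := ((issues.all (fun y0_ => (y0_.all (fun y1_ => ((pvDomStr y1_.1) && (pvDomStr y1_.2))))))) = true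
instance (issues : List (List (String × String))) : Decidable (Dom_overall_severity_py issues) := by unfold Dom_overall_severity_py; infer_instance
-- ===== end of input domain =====

-- B replaces A's materialised severities list and three sequential membership scans by a
-- single pass tracking the maximum severity rank (with early break on 'error'), then maps
-- the rank back to its label; objective: alternative decomposition, same asymptotic cost.


-- shared primitive: Python's i['severity'] (first matching key; "" stands in for the
-- KeyError case, which Pre_ excludes)
def sevOf (i : List (String × String)) : String :=
  (((i.find? (fun p => p.1 == "severity")).map (·.2)).getD "")

-- ===== PORT A =====
def overall_severity_py (issues : List (List (String × String))) : String :=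
  if issues = [] then "ok"
  else
    let severities := issues.map sevOf
    if severities.contains "error" then "error"
    else if severities.contains "warning" then "warning"
    else if severities.contains "info" then "info"
    else "ok"

-- ===== PORT B =====
def rankOf (s : String) : Nat :=
  if s == "error" then 3 else if s == "warning" then 2 else if s == "info" then 1 else 0

def sevLoop : List (List (String × String)) → Nat → Nat
  | [], rank => rank
  | i :: rest, rank =>
      let r := rankOf (sevOf i)
      let rank' := if rank < r then r else rank
      if rank' = 3 then rank' else sevLoop rest rank'

def overall_severity_py_alt (issues : List (List (String × String))) : String :=
  let rank := sevLoop issues 0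
  if rank = 3 then "error"
  else if rank = 2 then "warning"
  else if rank = 1 then "info"
  else "ok"

-- ===== PRECONDITION & SPEC =====
-- Pre_ excludes exactly the inputs where some issue dict lacks the key 'severity':
-- there Python A (and B) raise KeyError.
def Pre_overall_severity_py (issues : List (List (String × String))) : Prop :=
  (issues.all (fun i => i.any (fun p => p.1 == "severity"))) = true
instance (issues : List (List (String × String))) : Decidable (Pre_overall_severity_py issues) := by unfold Pre_overall_severity_py; infer_instance

def pvWitness_overall_severity_py : (List (List (String × String))) :=
  [[("severity", "warning")], [("severity", "bogus")], [("severity", "info")]]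

def Spec_overall_severity_py (issues : List (List (String × String))) (out : String) : Prop := out = overall_severity_py_alt issues
instance (issues : List (List (String × String))) (out : String) : Decidable (Spec_overall_severity_py issues out) := by unfold Spec_overall_severity_py; infer_instance

-- ===== CLAIM (what is proved, stated in full; the proofs are below) =====
def Claim_equal_overall_severity_py : Prop := ∀ (issues : List (List (String × String))), Dom_overall_severity_py issues → Pre_overall_severity_py issues → Spec_overall_severity_py issues (overall_severity_py issues)

-- ===== LEMMAS AND PROOFS =====
-- the maximum rank over the list, A-side characterisation target
def maxRank (issues : List (List (String × String))) : Nat :=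
  issues.foldr (fun i m => max (rankOf (sevOf i)) m) 0

theorem rankOf_le (s : String) : rankOf s ≤ 3 := by
  unfold rankOf; split_ifs <;> omega

theorem maxRank_le (issues : List (List (String × String))) : maxRank issues ≤ 3 := by
  induction issues with
  | nil => simp [maxRank]
  | cons i t ih =>
      simp only [maxRank, List.foldr] at ih ⊢
      have := rankOf_le (sevOf i); omega

theorem sevLoop_eq (issues : List (List (String × String))) (rank : Nat) :
    sevLoop issues rank = max rank (maxRank issues) := by
  induction issues generalizing rank with
  | nil => simp [sevLoop, maxRank]
  | cons i t ih =>
      simp only [sevLoop, maxRank, List.foldr] at ih ⊢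
      have hle := maxRank_le t
      have hr := rankOf_le (sevOf i)
      split_ifs with h1 h2 h2 <;> [skip; rw [ih]; skip; rw [ih]] <;>
        simp only [maxRank] at * <;> omega

theorem rank_eq_3 (s : String) : rankOf s = 3 ↔ s = "error" := by
  unfold rankOf; split_ifs with h1 h2 h3 <;> simp_all

theorem rank_eq_2 (s : String) : rankOf s = 2 ↔ s = "warning" := by
  unfold rankOf; split_ifs with h1 h2 h3 <;> simp_all

theorem rank_eq_1 (s : String) : rankOf s = 1 ↔ s = "info" := by
  unfold rankOf; split_ifs with h1 h2 h3 <;> simp_all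

theorem maxRank_ge_iff (issues : List (List (String × String))) (n : Nat) (hn : 1 ≤ n) :
    n ≤ maxRank issues ↔ ∃ i ∈ issues, n ≤ rankOf (sevOf i) := by
  induction issues with
  | nil => simp [maxRank]; omega
  | cons i t ih =>
      simp only [maxRank, List.foldr] at ih ⊢
      simp only [List.mem_cons, exists_eq_or_imp]
      constructor
      · intro h
        by_cases hg : n ≤ rankOf (sevOf i)
        · exact Or.inl hg
        · right; exact ih.mp (by omega)
      · rintro (h | h)
        · omega
        · have := ih.mpr h; omega

theorem contains_map_iff (issues : List (List (String × String))) (x : String) :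
    ((issues.map sevOf).contains x = true) ↔ ∃ i ∈ issues, sevOf i = x := by
  simp [List.mem_map, eq_comm]

-- ===== VERDICT (by name: the statement is the Claim_ definition above) =====
theorem overall_severity_py_spec : Claim_equal_overall_severity_py := by
  intro issues _ _
  unfold Spec_overall_severity_py overall_severity_py overall_severity_py_alt
  rw [sevLoop_eq, Nat.zero_max]
  have hle := maxRank_le issues
  have herr : ((issues.map sevOf).contains "error" = true) ↔ maxRank issues = 3 := by
    rw [contains_map_iff]
    constructor
    · rintro ⟨i, hi, h⟩
      have := (maxRank_ge_iff issues 3 (by omega)).mpr ⟨i, hi, by rw [(rank_eq_3 _).mpr h]⟩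
      omega
    · intro h
      obtain ⟨i, hi, hg⟩ := (maxRank_ge_iff issues 3 (by omega)).mp (by omega)
      have := rankOf_le (sevOf i)
      exact ⟨i, hi, (rank_eq_3 _).mp (by omega)⟩
  cases issues with
  | nil => simp [maxRank]
  | cons i0 t =>
      simp only [if_neg (List.cons_ne_nil i0 t)]
      by_cases h3 : maxRank (i0 :: t) = 3
      · rw [if_pos (herr.mpr h3), if_pos h3]
      · rw [if_neg (fun hc => h3 (herr.mp hc)), if_neg h3]
        have hwarn : ((((i0 :: t)).map sevOf).contains "warning" = true) ↔ maxRank (i0 :: t) = 2 := by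
          rw [contains_map_iff]
          constructor
          · rintro ⟨i, hi, h⟩
            have := (maxRank_ge_iff (i0 :: t) 2 (by omega)).mpr ⟨i, hi, by rw [(rank_eq_2 _).mpr h]⟩
            omega
          · intro h
            obtain ⟨i, hi, hg⟩ := (maxRank_ge_iff (i0 :: t) 2 (by omega)).mp (by omega)
            have ha : rankOf (sevOf i) ≠ 3 := by
              intro hc
              exact h3 (le_antisymm hle ((maxRank_ge_iff _ 3 (by omega)).mpr ⟨i, hi, by omega⟩))
            have := rankOf_le (sevOf i)
            exact ⟨i, hi, (rank_eq_2 _).mp (by omega)⟩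
        by_cases h2 : maxRank (i0 :: t) = 2
        · rw [if_pos (hwarn.mpr h2), if_pos h2]
        · rw [if_neg (fun hc => h2 (hwarn.mp hc)), if_neg h2]
          have hinfo : ((((i0 :: t)).map sevOf).contains "info" = true) ↔ maxRank (i0 :: t) = 1 := by
            rw [contains_map_iff]
            constructor
            · rintro ⟨i, hi, h⟩
              have := (maxRank_ge_iff (i0 :: t) 1 (by omega)).mpr ⟨i, hi, by rw [(rank_eq_1 _).mpr h]⟩
              omega
            · intro h
              obtain ⟨i, hi, hg⟩ := (maxRank_ge_iff (i0 :: t) 1 (by omega)).mp (by omega)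
              have ha : rankOf (sevOf i) ≠ 3 := by
                intro hc
                exact h3 (le_antisymm hle ((maxRank_ge_iff _ 3 (by omega)).mpr ⟨i, hi, by omega⟩))
              have hb : rankOf (sevOf i) ≠ 2 := by
                intro hc
                exact h2 (le_antisymm (by omega) ((maxRank_ge_iff _ 2 (by omega)).mpr ⟨i, hi, by omega⟩))
              have := rankOf_le (sevOf i)
              exact ⟨i, hi, (rank_eq_1 _).mp (by omega)⟩
          by_cases h1 : maxRank (i0 :: t) = 1
          · rw [if_pos (hinfo.mpr h1), if_pos h1]
          · rw [if_neg (fun hc => h1 (hinfo.mp hc)), if_neg h1]
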